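-- pv_equiv track=rewrite | github.com/Ojas-Singh/GlycoShape | API/lib/pdb.py | find_glycosylation_spots
-- ===== SOURCE A (Python) =====
-- def find_glycosylation_spots(sequence_with_info):
--     spots = []
--     sequence_length = len(sequence_with_info)
--
--     for i in range(sequence_length):
--         curr_residue, curr_chain, curr_resnum = sequence_with_info[i]
--
--         # Check for O-linked glycosylation sites (T, W, S, P)
--         if curr_residue in ['T', 'W', 'S', 'P']:
--             spots.append((i + 1, curr_chain, curr_resnum))
--
--         # Check for N-linked glycosylation sites (N-X-S/T, where X is not P)
--         if curr_residue == 'N' and i < sequence_length - 2: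
--             next_residue, _, _ = sequence_with_info[i+1]
--             next_next_residue, _, _ = sequence_with_info[i+2]
--
--             if next_residue != 'P' and next_next_residue in ['S', 'T']:
--                 spots.append((i + 1, curr_chain, curr_resnum))
--
--     return spots
-- ===== SOURCE B (Python) =====
-- def find_glycosylation_spots(sequence_with_info):
--     # Pass 1: O-linked spots.
--     o_spots = [(i + 1, chain, resnum)
--                for i, (residue, chain, resnum) in enumerate(sequence_with_info)
--                if residue in ('T', 'W', 'S', 'P')]
--     # Pass 2: N-linked sequons N-X-S/T (X != P), over sliding windows of three.
--     n_spots = [(i + 1, chain, resnum)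
--                for i, ((residue, chain, resnum), (nxt, _, _), (nxt2, _, _))
--                in enumerate(zip(sequence_with_info,
--                                 sequence_with_info[1:],
--                                 sequence_with_info[2:]))
--                if residue == 'N' and nxt != 'P' and nxt2 in ('S', 'T')]
--     # An index is never both an O spot and an N spot, so sorting by the
--     # 1-based index reproduces the single-scan interleaving exactly.
--     return sorted(o_spots + n_spots, key=lambda spot: spot[0])
-- ===== Notes on version B (the rewrite author's own statement) =====
-- stated objective: alternative
-- what changed: A's single index loop that interleaves both site tests is replaced by two independent passes (an O-linked comprehension over enumerate, an N-linked comprehension over zipped windows of three residues) whose results are merged by sorting on the 1-based index; since no index can satisfy both tests, the sort reproduces A's interleaved order exactly.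
import Mathlib
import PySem

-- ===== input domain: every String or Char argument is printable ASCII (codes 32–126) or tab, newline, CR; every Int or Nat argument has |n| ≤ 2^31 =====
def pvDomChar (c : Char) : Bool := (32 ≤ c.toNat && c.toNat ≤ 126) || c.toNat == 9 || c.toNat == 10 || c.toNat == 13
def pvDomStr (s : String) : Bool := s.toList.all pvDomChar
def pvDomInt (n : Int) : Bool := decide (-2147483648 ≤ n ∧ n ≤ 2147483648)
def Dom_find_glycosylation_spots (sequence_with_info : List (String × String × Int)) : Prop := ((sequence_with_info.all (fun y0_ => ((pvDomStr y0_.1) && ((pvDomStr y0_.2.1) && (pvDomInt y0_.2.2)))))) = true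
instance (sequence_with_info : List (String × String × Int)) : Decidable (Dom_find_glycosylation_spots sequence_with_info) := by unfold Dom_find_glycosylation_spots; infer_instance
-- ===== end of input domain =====

-- B replaces A's single interleaved index scan by two independent passes (an
-- O-linked pass over the residues and an N-linked pass over zipped windows of
-- three) merged by sorting on the 1-based index; objective: alternative decomposition.

-- ===== PORT A =====
def find_glycosylation_spots (sequence_with_info : List (String × String × Int)) : List (Int × String × Int) :=
  let sequence_length : Int := (sequence_with_info.length : Int)
  (PySem.List.pyRange 0 sequence_length).foldl (fun spots i =>
    let t := PySem.List.pyGetD sequence_with_info i ("", "", 0)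
    let curr_residue := t.1
    let curr_chain := t.2.1
    let curr_resnum := t.2.2
    let spots :=
      if curr_residue = "T" ∨ curr_residue = "W" ∨ curr_residue = "S" ∨ curr_residue = "P" then
        spots ++ [(i + 1, curr_chain, curr_resnum)]
      else spots
    if curr_residue = "N" ∧ i < sequence_length - 2 then
      let next_residue := (PySem.List.pyGetD sequence_with_info (i + 1) ("", "", 0)).1
      let next_next_residue := (PySem.List.pyGetD sequence_with_info (i + 2) ("", "", 0)).1
      if next_residue ≠ "P" ∧ (next_next_residue = "S" ∨ next_next_residue = "T") then
        spots ++ [(i + 1, curr_chain, curr_resnum)]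
      else spots
    else spots) []

-- ===== PORT B =====
def find_glycosylation_spots_alt (sequence_with_info : List (String × String × Int)) : List (Int × String × Int) :=
  let o_spots : List (Int × String × Int) :=
    (PySem.List.enumerate sequence_with_info).filterMap (fun p =>
      if p.2.1 = "T" ∨ p.2.1 = "W" ∨ p.2.1 = "S" ∨ p.2.1 = "P" then
        some (p.1 + 1, p.2.2.1, p.2.2.2)
      else none)
  let n_spots : List (Int × String × Int) :=
    (PySem.List.enumerate (sequence_with_info.zip
        ((PySem.List.slice sequence_with_info (some 1) none).zip
         (PySem.List.slice sequence_with_info (some 2) none)))).filterMap (fun p =>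
      if p.2.1.1 = "N" ∧ p.2.2.1.1 ≠ "P" ∧ (p.2.2.2.1 = "S" ∨ p.2.2.2.1 = "T") then
        some (p.1 + 1, p.2.1.2.1, p.2.1.2.2)
      else none)
  PySem.List.sorted (o_spots ++ n_spots) (fun spot => spot.1)

-- ===== PRECONDITION & SPEC =====
def Spec_find_glycosylation_spots (sequence_with_info : List (String × String × Int)) (out : List (Int × String × Int)) : Prop := out = find_glycosylation_spots_alt sequence_with_info
instance (sequence_with_info : List (String × String × Int)) (out : List (Int × String × Int)) : Decidable (Spec_find_glycosylation_spots sequence_with_info out) := by unfold Spec_find_glycosylation_spots; infer_instance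

-- ===== CLAIM (what is proved, stated in full; the proofs are below) =====
def Claim_equal_find_glycosylation_spots : Prop := ∀ (sequence_with_info : List (String × String × Int)), Dom_find_glycosylation_spots sequence_with_info → Spec_find_glycosylation_spots sequence_with_info (find_glycosylation_spots sequence_with_info)

-- ===== LEMMAS AND PROOFS =====

-- structural views of the three scans (proof helpers only)
def pvOSpots (i : Int) : List (String × String × Int) → List (Int × String × Int)
  | [] => []
  | x :: rest =>
    (if x.1 = "T" ∨ x.1 = "W" ∨ x.1 = "S" ∨ x.1 = "P" then [(i + 1, x.2.1, x.2.2)] else [])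
      ++ pvOSpots (i + 1) rest

def pvNWin (i : Int) (x : String × String × Int) :
    List (String × String × Int) → List (Int × String × Int)
  | y :: z :: _ =>
    if x.1 = "N" ∧ y.1 ≠ "P" ∧ (z.1 = "S" ∨ z.1 = "T") then [(i + 1, x.2.1, x.2.2)] else []
  | _ => []

def pvNSpots (i : Int) : List (String × String × Int) → List (Int × String × Int)
  | [] => []
  | x :: rest => pvNWin i x rest ++ pvNSpots (i + 1) rest

def pvMerged (i : Int) : List (String × String × Int) → List (Int × String × Int)
  | [] => []
  | x :: rest =>
    (if x.1 = "T" ∨ x.1 = "W" ∨ x.1 = "S" ∨ x.1 = "P" then [(i + 1, x.2.1, x.2.2)] else [])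
      ++ pvNWin i x rest ++ pvMerged (i + 1) rest

-- the per-index contribution of A's loop body (proof helper)
def pvG (seq : List (String × String × Int)) (i : Int) : List (Int × String × Int) :=
  (if (PySem.List.pyGetD seq i ("", "", 0)).1 = "T" ∨ (PySem.List.pyGetD seq i ("", "", 0)).1 = "W" ∨
      (PySem.List.pyGetD seq i ("", "", 0)).1 = "S" ∨ (PySem.List.pyGetD seq i ("", "", 0)).1 = "P" then
    [(i + 1, (PySem.List.pyGetD seq i ("", "", 0)).2.1, (PySem.List.pyGetD seq i ("", "", 0)).2.2)]
  else [])
    ++ (if (PySem.List.pyGetD seq i ("", "", 0)).1 = "N" ∧ i < (seq.length : Int) - 2 then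
          (if (PySem.List.pyGetD seq (i + 1) ("", "", 0)).1 ≠ "P" ∧
              ((PySem.List.pyGetD seq (i + 2) ("", "", 0)).1 = "S" ∨
               (PySem.List.pyGetD seq (i + 2) ("", "", 0)).1 = "T") then
            [(i + 1, (PySem.List.pyGetD seq i ("", "", 0)).2.1, (PySem.List.pyGetD seq i ("", "", 0)).2.2)]
          else [])
        else [])

lemma pvGetD_append (pre l : List (String × String × Int)) (j : Nat) (hj : j < l.length)
    (d : String × String × Int) :
    PySem.List.pyGetD (pre ++ l) ((pre.length : Int) + (j : Int)) d = l[j] := by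
  rw [PySem.List.pyGetD_eq_getElem _ d (by omega) (by simp; omega)]
  have ht : (((pre.length : Int) + (j : Int))).toNat = pre.length + j := by omega
  simp only [ht]
  rw [List.getElem_append_right (by omega)]
  congr 1
  omega

lemma pvG_at (pre : List (String × String × Int)) (x : String × String × Int)
    (rest : List (String × String × Int)) :
    pvG (pre ++ x :: rest) (pre.length : Int) =
      (if x.1 = "T" ∨ x.1 = "W" ∨ x.1 = "S" ∨ x.1 = "P" then
        [((pre.length : Int) + 1, x.2.1, x.2.2)] else [])
        ++ pvNWin (pre.length : Int) x rest := by
  have h0 : PySem.List.pyGetD (pre ++ x :: rest) (pre.length : Int) ("", "", 0) = x := by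
    simpa using pvGetD_append pre (x :: rest) 0 (by simp) ("", "", 0)
  unfold pvG
  rw [h0]
  congr 1
  match rest with
  | [] =>
    rw [if_neg (by rintro ⟨-, hlt⟩; simp at hlt; try omega)]
    simp [pvNWin]
  | [y] =>
    rw [if_neg (by rintro ⟨-, hlt⟩; simp at hlt; try omega)]
    simp [pvNWin]
  | y :: z :: r3 =>
    have h1 : PySem.List.pyGetD (pre ++ x :: y :: z :: r3) ((pre.length : Int) + 1) ("", "", 0) = y := by
      simpa using pvGetD_append pre (x :: y :: z :: r3) 1 (by simp) ("", "", 0)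
    have h2 : PySem.List.pyGetD (pre ++ x :: y :: z :: r3) ((pre.length : Int) + 2) ("", "", 0) = z := by
      simpa using pvGetD_append pre (x :: y :: z :: r3) 2 (by simp) ("", "", 0)
    have hlen : (pre.length : Int) < ((pre ++ x :: y :: z :: r3).length : Int) - 2 := by
      simp only [List.length_append, List.length_cons]
      push_cast
      omega
    by_cases hx : x.1 = "N"
    · rw [if_pos ⟨hx, hlen⟩, h1, h2]
      simp only [pvNWin, hx, true_and]
    · rw [if_neg (fun h => hx h.1)]
      simp [pvNWin, hx]

lemma pvFlat (l pre : List (String × String × Int)) :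
    (PySem.List.pyRange (pre.length : Int) ((pre.length : Int) + (l.length : Int))).flatMap
      (pvG (pre ++ l)) = pvMerged (pre.length : Int) l := by
  induction l generalizing pre with
  | nil => simp [pvMerged, PySem.List.pyRange_one_eq_nil]
  | cons x rest ih =>
    rw [PySem.List.pyRange_one_cons (by simp only [List.length_cons]; push_cast; omega), List.flatMap_cons]
    have htail := ih (pre ++ [x])
    have hcast : ((pre ++ [x]).length : Int) = (pre.length : Int) + 1 := by simp
    have hlist : (pre ++ [x]) ++ rest = pre ++ x :: rest := by simp
    rw [hcast, hlist] at htail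
    have hbound : (pre.length : Int) + ((x :: rest).length : Int)
        = ((pre.length : Int) + 1) + (rest.length : Int) := by simp only [List.length_cons]; push_cast; omega
    rw [hbound, htail, pvG_at]
    simp [pvMerged]

lemma pvA_eq_merged (seq : List (String × String × Int)) :
    find_glycosylation_spots seq = pvMerged 0 seq := by
  have hbody : (fun (spots : List (Int × String × Int)) (i : Int) =>
      let t := PySem.List.pyGetD seq i ("", "", 0)
      let curr_residue := t.1
      let curr_chain := t.2.1
      let curr_resnum := t.2.2
      let spots :=
        if curr_residue = "T" ∨ curr_residue = "W" ∨ curr_residue = "S" ∨ curr_residue = "P" then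
          spots ++ [(i + 1, curr_chain, curr_resnum)]
        else spots
      if curr_residue = "N" ∧ i < (seq.length : Int) - 2 then
        let next_residue := (PySem.List.pyGetD seq (i + 1) ("", "", 0)).1
        let next_next_residue := (PySem.List.pyGetD seq (i + 2) ("", "", 0)).1
        if next_residue ≠ "P" ∧ (next_next_residue = "S" ∨ next_next_residue = "T") then
          spots ++ [(i + 1, curr_chain, curr_resnum)]
        else spots
      else spots) = (fun spots i => spots ++ pvG seq i) := by
    funext spots i
    simp only [pvG]
    split_ifs <;> simp
  show (PySem.List.pyRange 0 (seq.length : Int)).foldl _ [] = _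
  rw [hbody, PySem.List.foldl_append_eq_flatMap]
  simpa using pvFlat seq []

lemma pvO_eq (l : List (String × String × Int)) (k : Int) :
    (PySem.List.enumerate l k).filterMap (fun p =>
      if p.2.1 = "T" ∨ p.2.1 = "W" ∨ p.2.1 = "S" ∨ p.2.1 = "P" then
        some (p.1 + 1, p.2.2.1, p.2.2.2)
      else none) = pvOSpots k l := by
  induction l generalizing k with
  | nil => simp [pvOSpots, PySem.List.enumerate]
  | cons x rest ih =>
    rw [PySem.List.enumerate_cons, List.filterMap_cons]
    by_cases h : x.1 = "T" ∨ x.1 = "W" ∨ x.1 = "S" ∨ x.1 = "P" <;>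
      simp [pvOSpots, h, ih]

lemma pvN_eq (l : List (String × String × Int)) (k : Int) :
    (PySem.List.enumerate (l.zip ((l.drop 1).zip (l.drop 2))) k).filterMap (fun p =>
      if p.2.1.1 = "N" ∧ p.2.2.1.1 ≠ "P" ∧ (p.2.2.2.1 = "S" ∨ p.2.2.2.1 = "T") then
        some (p.1 + 1, p.2.1.2.1, p.2.1.2.2)
      else none) = pvNSpots k l := by
  induction l generalizing k with
  | nil => simp [pvNSpots]
  | cons x rest ih =>
    match rest with
    | [] => simp [pvNSpots, pvNWin]
    | [y] => simp [pvNSpots, pvNWin]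
    | y :: z :: rest3 =>
      rw [show ((x :: y :: z :: rest3).zip
            (((x :: y :: z :: rest3).drop 1).zip ((x :: y :: z :: rest3).drop 2)))
          = (x, (y, z)) :: ((y :: z :: rest3).zip
              (((y :: z :: rest3).drop 1).zip ((y :: z :: rest3).drop 2))) from by simp]
      rw [PySem.List.enumerate_cons, List.filterMap_cons]
      by_cases h : x.1 = "N" ∧ y.1 ≠ "P" ∧ (z.1 = "S" ∨ z.1 = "T") <;>
        simp [pvNSpots, pvNWin, h, ih]

lemma pvMerged_perm (l : List (String × String × Int)) (k : Int) :
    (pvMerged k l).Perm (pvOSpots k l ++ pvNSpots k l) := by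
  induction l generalizing k with
  | nil => simp [pvMerged, pvOSpots, pvNSpots]
  | cons x rest ih =>
    simp only [pvMerged, pvOSpots, pvNSpots, List.append_assoc]
    refine List.Perm.append_left _ ?_
    exact (List.Perm.append_left _ (ih (k + 1))).trans (List.perm_append_comm_assoc _ _ _)

lemma pvMerged_fst_gt (l : List (String × String × Int)) (k : Int) :
    ∀ e ∈ pvMerged k l, k < e.1 := by
  induction l generalizing k with
  | nil => simp [pvMerged]
  | cons x rest ih =>
    intro e he
    simp only [pvMerged, List.mem_append] at he
    rcases he with (h | h) | h
    · split at h <;> simp_all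
    · match rest, h with
      | [], h => simp [pvNWin] at h
      | [y], h => simp [pvNWin] at h
      | y :: z :: r3, h =>
        simp only [pvNWin] at h
        split at h <;> simp_all
    · exact lt_trans (by omega) (ih (k + 1) e h)

lemma pvMerged_pairwise (l : List (String × String × Int)) (k : Int) :
    (pvMerged k l).Pairwise (fun a b => a.1 < b.1) := by
  induction l generalizing k with
  | nil => simp [pvMerged]
  | cons x rest ih =>
    simp only [pvMerged]
    have hwin : ∀ e ∈ (if x.1 = "T" ∨ x.1 = "W" ∨ x.1 = "S" ∨ x.1 = "P" then
        [(k + 1, x.2.1, x.2.2)] else []) ++ pvNWin k x rest, e.1 = k + 1 := by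
      intro e he
      rcases List.mem_append.1 he with h | h
      · split at h <;> simp_all
      · match rest, h with
        | [], h => simp [pvNWin] at h
        | [y], h => simp [pvNWin] at h
        | y :: z :: r3, h =>
          simp only [pvNWin] at h
          split at h <;> simp_all
    have hone : (if x.1 = "T" ∨ x.1 = "W" ∨ x.1 = "S" ∨ x.1 = "P" then
        [(k + 1, x.2.1, x.2.2)] else []) = [] ∨ pvNWin k x rest = [] := by
      by_cases h : x.1 = "T" ∨ x.1 = "W" ∨ x.1 = "S" ∨ x.1 = "P"
      · right
        match rest with
        | [] => rfl
        | [y] => rfl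
        | y :: z :: r3 =>
          simp only [pvNWin]
          rw [if_neg]
          rintro ⟨hN, -⟩
          rcases h with h | h | h | h <;> rw [h] at hN <;> simp_all
      · left; simp [h]
    rw [List.pairwise_append]
    refine ⟨?_, ih (k + 1), ?_⟩
    · rcases hone with h | h
      · rw [h, List.nil_append]
        match rest with
        | [] => simp [pvNWin]
        | [y] => simp [pvNWin]
        | y :: z :: r3 => simp only [pvNWin]; split <;> simp
      · rw [h, List.append_nil]
        split <;> simp
    · intro a ha b hb
      rw [hwin a ha]
      exact pvMerged_fst_gt rest (k + 1) b hb

-- ===== VERDICT (by name: the statement is the Claim_ definition above) =====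
theorem find_glycosylation_spots_spec : Claim_equal_find_glycosylation_spots := by
  intro seq _
  show find_glycosylation_spots seq = find_glycosylation_spots_alt seq
  rw [pvA_eq_merged]
  unfold find_glycosylation_spots_alt
  rw [show PySem.List.slice seq (some 1) none = seq.drop 1 from by
        simp [PySem.List.slice_from],
      show PySem.List.slice seq (some 2) none = seq.drop 2 from by
        simp [PySem.List.slice_from]]
  rw [pvO_eq, pvN_eq]
  exact (PySem.List.sorted_eq_of_perm_of_pairwise_lt _ _ _
    (pvMerged_perm seq 0) (pvMerged_pairwise seq 0)).symm
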